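-- pv_equiv track=rewrite | github.com/melisgncl/high-resolution-gut-microbiome-dynamics-during-antibiotic-pertubration | analysis/paenibacillus_resistance/gene_classification.py | classify_function
-- ===== SOURCE A (Python) =====
-- def classify_function(annotation):
--     """Assign functional category based on annotation keywords."""
--     ann_lower = annotation.lower()
--
--     # Order matters — more specific matches first
--     if any(kw in ann_lower for kw in ['transposase', 'is110', 'is4', 'is3',
--                                        'is200', 'is605', 'is701', 'is1595',
--                                        'insertion sequence', 'tn3']):
--         return 'IS_transposase'
--
--     if any(kw in ann_lower for kw in ['phage', 'capsid', 'tail fiber',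
--                                        'tail protein', 'baseplate',
--                                        'terminase', 'portal protein',
--                                        'head morphogenesis', 'holin']):
--         return 'phage'
--
--     if any(kw in ann_lower for kw in ['conjugal', 'conjugation', 'vird',
--                                        'virb', 'trbl', 'relaxase',
--                                        'type iv secret', 'moba',
--                                        'pilus assembly']):
--         return 'conjugation_ICE'
--
--     if any(kw in ann_lower for kw in ['integrase', 'recombinase',
--                                        'site-specific recombination']):
--         return 'integrase_recombinase'
--
--     if any(kw in ann_lower for kw in ['crispr', 'cas1', 'cas2', 'cas3',
--                                        'cas9', 'csm', 'cmr']):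
--         return 'CRISPR'
--
--     if any(kw in ann_lower for kw in ['toxin', 'antitoxin', 'mazf',
--                                        'maze', 'vapb', 'vapc',
--                                        'parE', 'relE', 'doc']):
--         return 'toxin_antitoxin'
--
--     if any(kw in ann_lower for kw in ['efflux', 'multidrug', 'drug resistance',
--                                        'acrb', 'mate efflux', 'norM',
--                                        'smr family']):
--         return 'drug_efflux'
--
--     if any(kw in ann_lower for kw in ['abc transporter', 'mfs transporter',
--                                        'permease', 'transporter',
--                                        'antiporter', 'symporter']):
--         return 'transport'
--
--     if any(kw in ann_lower for kw in ['transcriptional regulator',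
--                                        'dna-binding', 'tetr', 'laci',
--                                        'lysr', 'marr', 'merr', 'gntr',
--                                        'arac', 'sigma factor',
--                                        'anti-sigma']):
--         return 'regulatory'
--
--     if any(kw in ann_lower for kw in ['ribosomal protein', 'rrna',
--                                        'trna', 'translation',
--                                        'elongation factor']):
--         return 'ribosomal_translation'
--
--     if any(kw in ann_lower for kw in ['spore', 'sporulation',
--                                        'germination', 'ger']):
--         return 'sporulation'
--
--     if any(kw in ann_lower for kw in ['kinase', 'dehydrogenase',
--                                        'synthase', 'reductase',
--                                        'transferase', 'hydrolase',
--                                        'oxidoreductase', 'ligase',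
--                                        'lyase', 'isomerase', 'mutase',
--                                        'epimerase', 'aldolase',
--                                        'phosphatase', 'peptidase',
--                                        'protease', 'esterase']):
--         return 'metabolism_enzyme'
--
--     if any(kw in ann_lower for kw in ['hypothetical', 'uncharacterized',
--                                        'putative protein', 'duf']):
--         return 'hypothetical_DUF'
--
--     if any(kw in ann_lower for kw in ['membrane protein', 'cell wall',
--                                        'peptidoglycan', 'lipopolysaccharide',
--                                        'flagell', 'pilus', 'fimbri',
--                                        'chemotaxis']):
--         return 'cell_envelope_motility'
--
--     return 'other'
-- ===== SOURCE B (Python) =====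
-- # Exhaustive min-priority scoring: flatten the category table once into
-- # (priority, category, keyword) triples, then a single pass over ALL keywords
-- # keeping the lowest-priority match; no per-category any() and no early return.
-- _TABLE = [
--     ('IS_transposase', ['transposase', 'is110', 'is4', 'is3', 'is200', 'is605',
--                         'is701', 'is1595', 'insertion sequence', 'tn3']),
--     ('phage', ['phage', 'capsid', 'tail fiber', 'tail protein', 'baseplate',
--                'terminase', 'portal protein', 'head morphogenesis', 'holin']),
--     ('conjugation_ICE', ['conjugal', 'conjugation', 'vird', 'virb', 'trbl',
--                          'relaxase', 'type iv secret', 'moba', 'pilus assembly']),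
--     ('integrase_recombinase', ['integrase', 'recombinase',
--                                'site-specific recombination']),
--     ('CRISPR', ['crispr', 'cas1', 'cas2', 'cas3', 'cas9', 'csm', 'cmr']),
--     ('toxin_antitoxin', ['toxin', 'antitoxin', 'mazf', 'maze', 'vapb', 'vapc',
--                          'parE', 'relE', 'doc']),
--     ('drug_efflux', ['efflux', 'multidrug', 'drug resistance', 'acrb',
--                      'mate efflux', 'norM', 'smr family']),
--     ('transport', ['abc transporter', 'mfs transporter', 'permease',
--                    'transporter', 'antiporter', 'symporter']),
--     ('regulatory', ['transcriptional regulator', 'dna-binding', 'tetr', 'laci',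
--                     'lysr', 'marr', 'merr', 'gntr', 'arac', 'sigma factor',
--                     'anti-sigma']),
--     ('ribosomal_translation', ['ribosomal protein', 'rrna', 'trna',
--                                'translation', 'elongation factor']),
--     ('sporulation', ['spore', 'sporulation', 'germination', 'ger']),
--     ('metabolism_enzyme', ['kinase', 'dehydrogenase', 'synthase', 'reductase',
--                            'transferase', 'hydrolase', 'oxidoreductase',
--                            'ligase', 'lyase', 'isomerase', 'mutase',
--                            'epimerase', 'aldolase', 'phosphatase', 'peptidase',
--                            'protease', 'esterase']),
--     ('hypothetical_DUF', ['hypothetical', 'uncharacterized', 'putative protein',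
--                           'duf']),
--     ('cell_envelope_motility', ['membrane protein', 'cell wall', 'peptidoglycan',
--                                 'lipopolysaccharide', 'flagell', 'pilus',
--                                 'fimbri', 'chemotaxis']),
-- ]
--
-- _FLAT = [(prio, cat, kw)
--          for prio, (cat, kws) in enumerate(_TABLE)
--          for kw in kws]
--
--
-- def classify_function(annotation):
--     """Assign functional category based on annotation keywords."""
--     ann = annotation.lower()
--     best = None  # (priority, category) of the best-scoring keyword seen so far
--     for prio, cat, kw in _FLAT:
--         if (best is None or prio < best[0]) and kw in ann:
--             best = (prio, cat)
--     return 'other' if best is None else best[1]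
-- ===== Notes on version B (the rewrite author's own statement) =====
-- stated objective: alternative
-- what changed: Instead of A's 14-branch first-match chain with per-category any() and early return, B flattens the table once into (priority, category, keyword) triples and does one exhaustive pass over all keywords keeping the lowest-priority match, returning its category (or 'other' if none matched).
import Mathlib
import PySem

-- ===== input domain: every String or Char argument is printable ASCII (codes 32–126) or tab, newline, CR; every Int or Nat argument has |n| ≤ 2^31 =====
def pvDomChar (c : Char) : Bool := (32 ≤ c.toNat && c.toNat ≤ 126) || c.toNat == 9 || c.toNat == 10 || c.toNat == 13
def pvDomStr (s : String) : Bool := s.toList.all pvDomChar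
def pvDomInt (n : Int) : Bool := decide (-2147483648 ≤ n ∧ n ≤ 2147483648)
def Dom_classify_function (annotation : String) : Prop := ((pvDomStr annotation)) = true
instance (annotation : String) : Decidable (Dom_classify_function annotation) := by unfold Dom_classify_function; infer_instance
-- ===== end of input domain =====

-- B replaces A's 14-branch first-match chain by an exhaustive min-priority scan over a
-- flat (priority, category, keyword) list built once from the table; objective: alternative.

-- ===== PORT A =====
-- literal transliteration of A: lowercase once, then a chain of ifs, each testing any(kw in ann_lower for kw in [...])
def classify_function (annotation : String) : String :=
  let ann_lower := PySem.Str.lower annotation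
  if ["transposase", "is110", "is4", "is3", "is200", "is605", "is701", "is1595",
      "insertion sequence", "tn3"].any (fun kw => PySem.Str.isIn kw ann_lower) then
    "IS_transposase"
  else if ["phage", "capsid", "tail fiber", "tail protein", "baseplate", "terminase",
      "portal protein", "head morphogenesis", "holin"].any (fun kw => PySem.Str.isIn kw ann_lower) then
    "phage"
  else if ["conjugal", "conjugation", "vird", "virb", "trbl", "relaxase",
      "type iv secret", "moba", "pilus assembly"].any (fun kw => PySem.Str.isIn kw ann_lower) then
    "conjugation_ICE"
  else if ["integrase", "recombinase", "site-specific recombination"].any (fun kw => PySem.Str.isIn kw ann_lower) then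
    "integrase_recombinase"
  else if ["crispr", "cas1", "cas2", "cas3", "cas9", "csm", "cmr"].any (fun kw => PySem.Str.isIn kw ann_lower) then
    "CRISPR"
  else if ["toxin", "antitoxin", "mazf", "maze", "vapb", "vapc", "parE", "relE", "doc"].any (fun kw => PySem.Str.isIn kw ann_lower) then
    "toxin_antitoxin"
  else if ["efflux", "multidrug", "drug resistance", "acrb", "mate efflux", "norM",
      "smr family"].any (fun kw => PySem.Str.isIn kw ann_lower) then
    "drug_efflux"
  else if ["abc transporter", "mfs transporter", "permease", "transporter",
      "antiporter", "symporter"].any (fun kw => PySem.Str.isIn kw ann_lower) then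
    "transport"
  else if ["transcriptional regulator", "dna-binding", "tetr", "laci", "lysr", "marr",
      "merr", "gntr", "arac", "sigma factor", "anti-sigma"].any (fun kw => PySem.Str.isIn kw ann_lower) then
    "regulatory"
  else if ["ribosomal protein", "rrna", "trna", "translation", "elongation factor"].any (fun kw => PySem.Str.isIn kw ann_lower) then
    "ribosomal_translation"
  else if ["spore", "sporulation", "germination", "ger"].any (fun kw => PySem.Str.isIn kw ann_lower) then
    "sporulation"
  else if ["kinase", "dehydrogenase", "synthase", "reductase", "transferase",
      "hydrolase", "oxidoreductase", "ligase", "lyase", "isomerase", "mutase",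
      "epimerase", "aldolase", "phosphatase", "peptidase", "protease", "esterase"].any (fun kw => PySem.Str.isIn kw ann_lower) then
    "metabolism_enzyme"
  else if ["hypothetical", "uncharacterized", "putative protein", "duf"].any (fun kw => PySem.Str.isIn kw ann_lower) then
    "hypothetical_DUF"
  else if ["membrane protein", "cell wall", "peptidoglycan", "lipopolysaccharide",
      "flagell", "pilus", "fimbri", "chemotaxis"].any (fun kw => PySem.Str.isIn kw ann_lower) then
    "cell_envelope_motility"
  else "other"

-- ===== PORT B =====
-- Source B's category table
def pvTable : List (String × List String) :=
  [("IS_transposase", ["transposase", "is110", "is4", "is3", "is200", "is605",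
                       "is701", "is1595", "insertion sequence", "tn3"]),
   ("phage", ["phage", "capsid", "tail fiber", "tail protein", "baseplate",
              "terminase", "portal protein", "head morphogenesis", "holin"]),
   ("conjugation_ICE", ["conjugal", "conjugation", "vird", "virb", "trbl",
                        "relaxase", "type iv secret", "moba", "pilus assembly"]),
   ("integrase_recombinase", ["integrase", "recombinase", "site-specific recombination"]),
   ("CRISPR", ["crispr", "cas1", "cas2", "cas3", "cas9", "csm", "cmr"]),
   ("toxin_antitoxin", ["toxin", "antitoxin", "mazf", "maze", "vapb", "vapc",
                        "parE", "relE", "doc"]),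
   ("drug_efflux", ["efflux", "multidrug", "drug resistance", "acrb",
                    "mate efflux", "norM", "smr family"]),
   ("transport", ["abc transporter", "mfs transporter", "permease",
                  "transporter", "antiporter", "symporter"]),
   ("regulatory", ["transcriptional regulator", "dna-binding", "tetr", "laci",
                   "lysr", "marr", "merr", "gntr", "arac", "sigma factor", "anti-sigma"]),
   ("ribosomal_translation", ["ribosomal protein", "rrna", "trna",
                              "translation", "elongation factor"]),
   ("sporulation", ["spore", "sporulation", "germination", "ger"]),
   ("metabolism_enzyme", ["kinase", "dehydrogenase", "synthase", "reductase",
                          "transferase", "hydrolase", "oxidoreductase", "ligase",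
                          "lyase", "isomerase", "mutase", "epimerase", "aldolase",
                          "phosphatase", "peptidase", "protease", "esterase"]),
   ("hypothetical_DUF", ["hypothetical", "uncharacterized", "putative protein", "duf"]),
   ("cell_envelope_motility", ["membrane protein", "cell wall", "peptidoglycan",
                               "lipopolysaccharide", "flagell", "pilus", "fimbri",
                               "chemotaxis"])]

-- Source B: _FLAT = [(prio, cat, kw) for prio, (cat, kws) in enumerate(_TABLE) for kw in kws]
def pvFlat : List (Int × String × String) :=
  (PySem.List.enumerate pvTable).flatMap
    (fun pc => pc.2.2.map (fun kw => (pc.1, pc.2.1, kw)))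

-- body of Source B's loop: keep the best (lowest-priority) matching keyword's (prio, cat)
def pvStep (ann : String) (best : Option (Int × String)) (t : Int × String × String) :
    Option (Int × String) :=
  if ((match best with | none => true | some b => decide (t.1 < b.1))
      && PySem.Str.isIn t.2.2 ann) then some (t.1, t.2.1) else best

-- Source B: return 'other' if best is None else best[1]
def pvFinish (best : Option (Int × String)) : String :=
  match best with
  | none => "other"
  | some b => b.2

def classify_function_alt (annotation : String) : String :=
  let ann := PySem.Str.lower annotation
  let best := pvFlat.foldl (pvStep ann) none
  pvFinish best

-- ===== PRECONDITION & SPEC =====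
def Spec_classify_function (annotation : String) (out : String) : Prop := out = classify_function_alt annotation
instance (annotation : String) (out : String) : Decidable (Spec_classify_function annotation out) := by unfold Spec_classify_function; infer_instance

-- ===== CLAIM (what is proved, stated in full; the proofs are below) =====
def Claim_equal_classify_function : Prop := ∀ (annotation : String), Dom_classify_function annotation → Spec_classify_function annotation (classify_function annotation)

-- ===== LEMMAS AND PROOFS =====

-- flat list of one rule list suffix, starting at priority k
def pvFlatFrom (rs : List (String × List String)) (k : Int) : List (Int × String × String) :=
  (PySem.List.enumerate rs k).flatMap (fun pc => pc.2.2.map (fun kw => (pc.1, pc.2.1, kw)))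

-- first-match chain over the rule suffix, tracking the priority index
def pvChain (ann : String) : List (String × List String) → Int → Option (Int × String)
  | [], _ => none
  | (cat, kws) :: rs, k =>
      if kws.any (fun kw => PySem.Str.isIn kw ann) then some (k, cat)
      else pvChain ann rs (k + 1)

theorem pvFlatFrom_nil (k : Int) : pvFlatFrom [] k = [] := rfl

theorem pvFlatFrom_cons (cat : String) (kws : List String)
    (rs : List (String × List String)) (k : Int) :
    pvFlatFrom ((cat, kws) :: rs) k
      = kws.map (fun kw => (k, cat, kw)) ++ pvFlatFrom rs (k + 1) := by
  simp [pvFlatFrom, PySem.List.enumerate_cons]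

theorem pvFlatFrom_prio_ge (rs : List (String × List String)) (k : Int)
    (t : Int × String × String) (ht : t ∈ pvFlatFrom rs k) : k ≤ t.1 := by
  induction rs generalizing k with
  | nil => simp [pvFlatFrom_nil] at ht
  | cons r rs ih =>
      obtain ⟨cat, kws⟩ := r
      rw [pvFlatFrom_cons] at ht
      rcases List.mem_append.1 ht with h | h
      · obtain ⟨kw, _, rfl⟩ := List.mem_map.1 h; exact le_refl k
      · have := ih (k + 1) h; omega

-- once best has priority ≤ all remaining priorities, the fold keeps it
theorem pvFold_stay (ann : String) (b : Int × String)
    (xs : List (Int × String × String)) (hb : ∀ t ∈ xs, b.1 ≤ t.1) :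
    xs.foldl (pvStep ann) (some b) = some b := by
  induction xs with
  | nil => rfl
  | cons t xs ih =>
      have h1 : b.1 ≤ t.1 := hb t (List.mem_cons_self ..)
      have hstep : pvStep ann (some b) t = some b := by
        simp [pvStep]; omega
      rw [List.foldl_cons, hstep]
      exact ih (fun u hu => hb u (List.mem_cons_of_mem _ hu))

-- scanning one category's keyword block from none
theorem pvFold_block (ann : String) (k : Int) (cat : String) (kws : List String) :
    (kws.map (fun kw => (k, cat, kw))).foldl (pvStep ann) none
      = (if kws.any (fun kw => PySem.Str.isIn kw ann) then some (k, cat) else none) := by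
  induction kws with
  | nil => rfl
  | cons kw kws ih =>
      rw [List.map_cons, List.foldl_cons]
      by_cases h : PySem.Str.isIn kw ann = true
      · have hstep : pvStep ann none (k, cat, kw) = some (k, cat) := by
          unfold pvStep; rw [h]; rfl
        rw [hstep, pvFold_stay ann (k, cat) _ (by
              intro t ht; obtain ⟨kw', _, rfl⟩ := List.mem_map.1 ht; exact le_refl k)]
        rw [if_pos (by simp only [List.any_cons, h, Bool.true_or])]
      · have h' : PySem.Str.isIn kw ann = false := by
          revert h; cases PySem.Str.isIn kw ann <;> simp
        have hstep : pvStep ann none (k, cat, kw) = none := by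
          unfold pvStep; rw [h', Bool.and_false]; rfl
        rw [hstep, ih]
        simp only [List.any_cons, h', Bool.false_or]

-- the exhaustive min-priority fold over the flat list equals the first-match chain
theorem pvFold_eq_chain (ann : String) (rs : List (String × List String)) (k : Int) :
    (pvFlatFrom rs k).foldl (pvStep ann) none = pvChain ann rs k := by
  induction rs generalizing k with
  | nil => rfl
  | cons r rs ih =>
      obtain ⟨cat, kws⟩ := r
      rw [pvFlatFrom_cons, List.foldl_append, pvFold_block]
      by_cases h : kws.any (fun kw => PySem.Str.isIn kw ann) = true
      · rw [if_pos h,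
            pvFold_stay ann (k, cat) _ (fun t ht => by
              have := pvFlatFrom_prio_ge rs (k + 1) t ht; omega)]
        simp only [pvChain]
        rw [if_pos h]
      · rw [if_neg h, ih (k + 1)]
        simp only [pvChain]
        rw [if_neg h]

theorem pvFlat_eq_flatFrom : pvFlat = pvFlatFrom pvTable 0 := rfl

-- first-match chain returning only the category (the shape of A's unrolled ifs)
def pvChainCat (ann : String) : List (String × List String) → String
  | [] => "other"
  | (cat, kws) :: rs =>
      if kws.any (fun kw => PySem.Str.isIn kw ann) then cat else pvChainCat ann rs

theorem pvFinish_chain (ann : String) (rs : List (String × List String)) (k : Int) :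
    pvFinish (pvChain ann rs k) = pvChainCat ann rs := by
  induction rs generalizing k with
  | nil => rfl
  | cons r rs ih =>
      obtain ⟨cat, kws⟩ := r
      simp only [pvChain, pvChainCat]
      by_cases h : kws.any (fun kw => PySem.Str.isIn kw ann) = true
      · rw [if_pos h, if_pos h]; rfl
      · rw [if_neg h, if_neg h, ih (k + 1)]

-- ===== VERDICT (by name: the statement is the Claim_ definition above) =====
theorem classify_function_spec : Claim_equal_classify_function := by
  intro annotation _
  unfold Spec_classify_function classify_function classify_function_alt
  simp only [pvFlat_eq_flatFrom, pvFold_eq_chain, pvFinish_chain]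
  rfl
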